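-- pv_equiv track=rewrite | github.com/GabenRulez/MOwNiT | lab01/zad2.py | pomocSumyBinarnej
-- ===== SOURCE A (Python) =====
-- def pomocSumyBinarnej(tablica, start, koniec):
--     if start == koniec:
--         return tablica[start]
--
--     elif start + 1 == koniec:
--         return tablica[start] + tablica[koniec]
--
--     else:
--         breakout = int( int(start+koniec)/2 )
--         return pomocSumyBinarnej(tablica, start, breakout) + pomocSumyBinarnej(tablica, breakout+1, koniec)
-- ===== SOURCE B (Python) =====
-- def pomocSumyBinarnej(tablica, start, koniec):
--     suma = 0
--     for i in range(start, koniec + 1):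
--         suma += tablica[i]
--     return suma
-- ===== Notes on version B (the rewrite author's own statement) =====
-- stated objective: simpler
-- what changed: Replaces the divide-and-conquer midpoint recursion by a single plain loop summing tablica[i] over range(start, koniec+1); over integers the addition grouping is irrelevant, so the value is identical. Pre_ excludes start > koniec (A recurses forever) and out-of-range indices (A raises IndexError).
import Mathlib
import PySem

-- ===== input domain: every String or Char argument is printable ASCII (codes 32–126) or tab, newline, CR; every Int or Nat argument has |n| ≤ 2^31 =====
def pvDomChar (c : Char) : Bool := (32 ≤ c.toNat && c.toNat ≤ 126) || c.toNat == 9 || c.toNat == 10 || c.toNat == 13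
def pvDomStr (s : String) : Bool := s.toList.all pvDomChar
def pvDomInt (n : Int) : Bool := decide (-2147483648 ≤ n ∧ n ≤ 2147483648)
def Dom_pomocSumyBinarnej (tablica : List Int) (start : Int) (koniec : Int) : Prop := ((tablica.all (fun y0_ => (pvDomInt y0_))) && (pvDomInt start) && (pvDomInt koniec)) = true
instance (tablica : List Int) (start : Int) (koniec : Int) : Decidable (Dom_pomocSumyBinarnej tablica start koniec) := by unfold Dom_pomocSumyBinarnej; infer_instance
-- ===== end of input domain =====

-- B replaces the midpoint recursion by one plain loop over range(start, koniec+1);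
-- over integers the addition grouping is irrelevant. Objective: simpler (no speed claim).

-- ===== PORT A =====
-- int(x/2) truncates toward zero; Lean's Int `/` floors for positive divisor
def pvPolowa (x : Int) : Int := if 0 ≤ x then x / 2 else -((-x) / 2)

-- literal port of the recursion; the Nat fuel is only a totality guard: with
-- start > koniec the Python recursion never returns (it diverges), outside Pre_,
-- and the supplied fuel is proved sufficient whenever start ≤ koniec
def pvRekur (tablica : List Int) (start : Int) (koniec : Int) : Nat → Int
  | 0 => 0
  | fuel + 1 =>
    if start = koniec then PySem.List.pyGetD tablica start 0
    else if start + 1 = koniec then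
      PySem.List.pyGetD tablica start 0 + PySem.List.pyGetD tablica koniec 0
    else
      let breakout := pvPolowa (start + koniec)
      pvRekur tablica start breakout fuel + pvRekur tablica (breakout + 1) koniec fuel

def pomocSumyBinarnej (tablica : List Int) (start : Int) (koniec : Int) : Int :=
  pvRekur tablica start koniec ((koniec - start).toNat + 1)

-- ===== PORT B =====
-- 'suma = 0; for i in range(start, koniec+1): suma += tablica[i]'
def pomocSumyBinarnej_alt (tablica : List Int) (start : Int) (koniec : Int) : Int :=
  (PySem.List.pyRange start (koniec + 1) 1).foldl
    (fun suma i => suma + PySem.List.pyGetD tablica i 0) 0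

-- ===== PRECONDITION & SPEC =====
-- exactly the inputs on which the Python A returns: start > koniec makes the
-- recursion diverge (RecursionError) and an index of [start,koniec] outside
-- [-len, len) raises IndexError
def Pre_pomocSumyBinarnej (tablica : List Int) (start : Int) (koniec : Int) : Prop :=
  start ≤ koniec ∧ -(tablica.length : Int) ≤ start ∧ koniec < tablica.length
instance (tablica : List Int) (start : Int) (koniec : Int) : Decidable (Pre_pomocSumyBinarnej tablica start koniec) := by unfold Pre_pomocSumyBinarnej; infer_instance

def pvWitness_pomocSumyBinarnej : List Int × Int × Int := ([3, 1, 4, 1, 5], 0, 4)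

def Spec_pomocSumyBinarnej (tablica : List Int) (start : Int) (koniec : Int) (out : Int) : Prop := out = pomocSumyBinarnej_alt tablica start koniec
instance (tablica : List Int) (start : Int) (koniec : Int) (out : Int) : Decidable (Spec_pomocSumyBinarnej tablica start koniec out) := by unfold Spec_pomocSumyBinarnej; infer_instance

-- ===== CLAIM =====
def Claim_equal_pomocSumyBinarnej : Prop := ∀ (tablica : List Int) (start : Int) (koniec : Int), Dom_pomocSumyBinarnej tablica start koniec → Pre_pomocSumyBinarnej tablica start koniec → Spec_pomocSumyBinarnej tablica start koniec (pomocSumyBinarnej tablica start koniec)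

-- ===== LEMMAS AND PROOFS =====

lemma pvPolowa_bounds (s k : Int) (h : s + 2 ≤ k) :
    s + 1 ≤ pvPolowa (s + k) ∧ pvPolowa (s + k) + 1 ≤ k := by
  unfold pvPolowa; split <;> omega

-- A's recursion computes the plain sum over the index range, for any sufficient fuel
lemma pvRekur_eq_sum (tablica : List Int) :
    ∀ n (s k : Int), (k - s).toNat = n → s ≤ k → ∀ fuel : Nat, n < fuel →
      pvRekur tablica s k fuel =
        ((PySem.List.pyRange s (k + 1) 1).map
          (fun i => PySem.List.pyGetD tablica i 0)).sum := by
  intro n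
  induction n using Nat.strong_induction_on with
  | _ n ih =>
    intro s k hn hsk fuel hf
    obtain ⟨g, rfl⟩ : ∃ g, fuel = g + 1 := ⟨fuel - 1, by omega⟩
    by_cases e1 : s = k
    · subst e1
      rw [PySem.List.pyRange_one_cons (by omega), PySem.List.pyRange_one_eq_nil (by omega)]
      simp [pvRekur]
    · by_cases e2 : s + 1 = k
      · subst e2
        rw [PySem.List.pyRange_one_cons (by omega), PySem.List.pyRange_one_cons (by omega),
            PySem.List.pyRange_one_eq_nil (by omega)]
        simp [pvRekur, e1]
      · have h3 : s + 2 ≤ k := by omega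
        have hb := pvPolowa_bounds s k h3
        simp only [pvRekur, if_neg e1, if_neg e2]
        rw [ih ((pvPolowa (s + k)) - s).toNat (by omega) s (pvPolowa (s + k)) rfl
              (by omega) g (by omega),
            ih (k - (pvPolowa (s + k) + 1)).toNat (by omega) (pvPolowa (s + k) + 1) k rfl
              (by omega) g (by omega)]
        rw [PySem.List.pyRange_one_append s (pvPolowa (s + k) + 1) (k + 1) (by omega) (by omega)]
        simp only [List.map_append, List.sum_append]

-- ===== VERDICT =====
theorem pomocSumyBinarnej_spec : Claim_equal_pomocSumyBinarnej := by
  intro tablica start koniec _ hpre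
  unfold Spec_pomocSumyBinarnej pomocSumyBinarnej pomocSumyBinarnej_alt
  rw [pvRekur_eq_sum tablica (koniec - start).toNat start koniec rfl hpre.1
        ((koniec - start).toNat + 1) (by omega),
      PySem.List.foldl_add]
  simp
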